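-- pv_equiv track=rewrite | github.com/thomasmichaelkane/aoc24 | lib.py | find_regions_as_local_arrays
-- ===== SOURCE A (Python) =====
-- def find_regions_as_local_arrays(matrix):
--     rows, cols = len(matrix), len(matrix[0])
--     visited = [[False] * cols for _ in range(rows)]
--     local_regions = []
--
--     def is_valid(r, c):
--         return 0 <= r < rows and 0 <= c < cols and matrix[r][c] and not visited[r][c]
--
--     def dfs(r, c):
--         # Perform DFS to mark all connected cells and find bounding box
--         stack = [(r, c)]
--         region_cells = []
--         min_row, max_row, min_col, max_col = rows, -1, cols, -1
--         while stack:
--             x, y = stack.pop()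
--             if not visited[x][y]:
--                 visited[x][y] = True
--                 region_cells.append((x, y))
--                 # Update bounding box
--                 min_row = min(min_row, x)
--                 max_row = max(max_row, x)
--                 min_col = min(min_col, y)
--                 max_col = max(max_col, y)
--                 # Check only 4 directions: N, S, E, W
--                 for dr, dc in [(-1, 0), (1, 0), (0, -1), (0, 1)]:
--                     if is_valid(x + dr, y + dc):
--                         stack.append((x + dr, y + dc))
--         return region_cells, min_row, max_row, min_col, max_col
--
--     for r in range(rows):
--         for c in range(cols):
--             if matrix[r][c] and not visited[r][c]:
--                 # Perform DFS and get region cells and bounding box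
--                 region_cells, min_row, max_row, min_col, max_col = dfs(r, c)
--                 # Create submatrix for the region with bounding False area
--                 region_height = max_row - min_row + 1
--                 region_width = max_col - min_col + 1
--                 region_array = [[False] * (region_width + 2) for _ in range(region_height + 2)]
--                 for x, y in region_cells:
--                     region_array[x - min_row + 1][y - min_col + 1] = True
--                 local_regions.append(region_array)
--
--     return local_regions
-- ===== SOURCE B (Python) =====
-- def find_regions_as_local_arrays(matrix):
--     rows, cols = len(matrix), len(matrix[0])
--     visited = set()
--     regions = []
--     for r in range(rows):
--         for c in range(cols):
--             if matrix[r][c] and (r, c) not in visited: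
--                 # BFS with mark-on-enqueue; the queue itself accumulates the component
--                 visited.add((r, c))
--                 queue = [(r, c)]
--                 head = 0
--                 while head < len(queue):
--                     x, y = queue[head]
--                     head += 1
--                     for nx, ny in ((x - 1, y), (x + 1, y), (x, y - 1), (x, y + 1)):
--                         if 0 <= nx < rows and 0 <= ny < cols and (nx, ny) not in visited and matrix[nx][ny]:
--                             visited.add((nx, ny))
--                             queue.append((nx, ny))
--                 xs = [x for x, _ in queue]
--                 ys = [y for _, y in queue]
--                 min_r, max_r = min(xs), max(xs)
--                 min_c, max_c = min(ys), max(ys)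
--                 cellset = set(queue)
--                 regions.append([[(min_r - 1 + i, min_c - 1 + j) in cellset
--                                  for j in range(max_c - min_c + 3)]
--                                 for i in range(max_r - min_r + 3)])
--     return regions
-- ===== Notes on version B (the rewrite author's own statement) =====
-- stated objective: alternative
-- what changed: Replaces the stack-based DFS with lazy deletion over a 2D visited array by a mark-on-enqueue BFS over a visited set of coordinate pairs, computes each bounding box after the traversal instead of incrementally, and builds each padded region by a membership-test comprehension instead of mutating a preallocated False array.
-- outside the precondition, e.g. on find_regions_as_local_arrays([]): A raises IndexError, B raises IndexError; on find_regions_as_local_arrays([[True, True], [True]]): A raises IndexError, B raises IndexError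
import Mathlib
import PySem

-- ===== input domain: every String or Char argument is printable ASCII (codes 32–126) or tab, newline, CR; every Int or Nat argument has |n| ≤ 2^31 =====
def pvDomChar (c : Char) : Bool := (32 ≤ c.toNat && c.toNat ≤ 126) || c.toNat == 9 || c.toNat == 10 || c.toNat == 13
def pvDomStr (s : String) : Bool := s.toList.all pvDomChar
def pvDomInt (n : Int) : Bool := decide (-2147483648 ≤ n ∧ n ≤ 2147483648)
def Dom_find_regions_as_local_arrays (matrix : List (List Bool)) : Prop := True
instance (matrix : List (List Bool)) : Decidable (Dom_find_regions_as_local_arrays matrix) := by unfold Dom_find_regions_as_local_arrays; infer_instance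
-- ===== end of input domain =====

-- B replaces A's lazy-deletion stack DFS over a 2D visited array by a mark-on-enqueue BFS over a
-- visited set of coordinate pairs, computes each bounding box after the traversal instead of
-- incrementally, and builds each padded region by a membership comprehension instead of mutating
-- a preallocated array (objective: alternative, same cost).

-- ===== PORT A =====

/-- `m[r][c]` read (Python indexing, negative wrap); `.getD false` is only a totalization
default: inside `Pre_` every read the programs perform is in range. -/
def pvGet2 (m : List (List Bool)) (r c : Int) : Bool :=
  ((PySem.List.pyGet? m r).bind fun row => PySem.List.pyGet? row c).getD false

/-- `m[r][c]` as an Option (`none` = IndexError). -/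
def pvGet2? (m : List (List Bool)) (r c : Int) : Option Bool :=
  (PySem.List.pyGet? m r).bind fun row => PySem.List.pyGet? row c

/-- `m[r][c] = b` (Python list assignment; all writes the programs perform are in range). -/
def pvSet2 (m : List (List Bool)) (r c : Int) (b : Bool) : List (List Bool) :=
  PySem.List.pySetD m r (PySem.List.pySetD (PySem.List.pyGetD m r []) c b)

/-- the literal neighbour list `[(-1,0),(1,0),(0,-1),(0,1)]` applied to `(x, y)`. -/
def pvNbrs (x y : Int) : List (Int × Int) := [(x-1,y),(x+1,y),(x,y-1),(x,y+1)]

/-- A's `is_valid(r, c)`. -/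
def pvIsValidA (matrix visited : List (List Bool)) (rows cols r c : Int) : Bool :=
  decide (0 ≤ r) && decide (r < rows) && decide (0 ≤ c) && decide (c < cols) &&
    pvGet2 matrix r c && !(pvGet2 visited r c)

/-- number of `false` entries of the visited array (termination measure only). -/
def pvFalseCount (v : List (List Bool)) : Nat := (v.map (fun row => row.count false)).sum

theorem pvCount_false_set_lt (row : List Bool) : ∀ m : Nat, row[m]? = some false →
    (row.set m true).count false < row.count false := by
  induction row with
  | nil => intro m hm; simp at hm
  | cons a t ih =>
    intro m hm
    cases m with
    | zero =>
      simp only [List.getElem?_cons_zero, Option.some.injEq] at hm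
      subst hm; simp
    | succ m =>
      simp only [List.getElem?_cons_succ] at hm
      have := ih m hm
      simp only [List.set_cons_succ, List.count_cons]
      omega

theorem pvFalseCount_set (v : List (List Bool)) : ∀ (k : Nat) (row row' : List Bool),
    v[k]? = some row →
    pvFalseCount (v.set k row') + row.count false = pvFalseCount v + row'.count false := by
  induction v with
  | nil => intro k row row' h; simp at h
  | cons a t ih =>
    intro k row row' h
    cases k with
    | zero =>
      simp only [List.getElem?_cons_zero, Option.some.injEq] at h
      subst h; simp [pvFalseCount]; omega
    | succ k =>
      simp only [List.getElem?_cons_succ] at h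
      have := ih k row row' h
      simp only [List.set_cons_succ, pvFalseCount, List.map_cons, List.sum_cons] at *
      omega

theorem pvGet2?_elim (v : List (List Bool)) (x y : Int) (b c : Bool)
    (h : pvGet2? v x y = some b) :
    ∃ (k m : Nat) (row : List Bool), v[k]? = some row ∧ row[m]? = some b ∧
      pvSet2 v x y c = v.set k (row.set m c) := by
  simp only [pvGet2?, PySem.List.pyGet?, Option.bind_eq_some_iff] at h
  obtain ⟨row, ⟨⟨k, hk, hrow⟩, m, hm, hb⟩⟩ := h
  refine ⟨k, m, row, hrow, hb, ?_⟩
  simp only [pvSet2, PySem.List.pySetD, PySem.List.pySet?, PySem.List.pyGetD,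
    PySem.List.pyGet?, hk, hm, Option.bind_some, hrow, Option.getD_some, Option.map_some]

theorem pvFalseCount_set2_lt (v : List (List Bool)) (x y : Int)
    (h : pvGet2? v x y = some false) :
    pvFalseCount (pvSet2 v x y true) < pvFalseCount v := by
  obtain ⟨k, m, row, hrow, hb, hset⟩ := pvGet2?_elim v x y false true h
  have h1 := pvCount_false_set_lt row m hb
  have h2 := pvFalseCount_set v k row (row.set m true) hrow
  rw [hset]; omega

/-- A's `dfs` while-loop: stack top at the list head (Python pushes/pops at the end). -/
def pvDfsA (matrix : List (List Bool)) (rows cols : Int) :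
    List (Int × Int) → List (List Bool) → List (Int × Int) → Int → Int → Int → Int →
    List (Int × Int) × Int × Int × Int × Int × List (List Bool)
  | [], visited, cells, minr, maxr, minc, maxc => (cells, minr, maxr, minc, maxc, visited)
  | (x, y) :: rest, visited, cells, minr, maxr, minc, maxc =>
    match h : pvGet2? visited x y with
    | some false =>
      -- `if not visited[x][y]:` — mark, record, update the box, push the valid neighbours
      let visited' := pvSet2 visited x y true
      let pushes := (pvNbrs x y).filter (fun p => pvIsValidA matrix visited' rows cols p.1 p.2)
      pvDfsA matrix rows cols (pushes.foldl (fun st n => n :: st) rest) visited'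
        (cells ++ [(x, y)]) (min minr x) (max maxr x) (min minc y) (max maxc y)
    | some true => pvDfsA matrix rows cols rest visited cells minr maxr minc maxc
    | none => -- Python would raise here; never reached (every stack cell is in range)
      pvDfsA matrix rows cols rest visited cells minr maxr minc maxc
  termination_by stack visited _ _ _ _ _ => 5 * pvFalseCount visited + stack.length
  decreasing_by
  · have hlt := pvFalseCount_set2_lt visited x y h
    have hlen : ∀ ps : List (Int × Int), ps.length ≤ 4 →
        (ps.foldl (fun st n => n :: st) rest).length ≤ rest.length + 4 := by
      intro ps hps
      rw [List.foldl_flip_cons_eq_append']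
      simp only [List.length_append, List.length_reverse]; omega
    have hlen' := hlen _ (by
      simpa using List.length_filter_le (fun p => pvIsValidA matrix (pvSet2 visited x y true) rows cols p.1 p.2) (pvNbrs x y))
    simp only [List.length_cons]; omega
  · simp only [List.length_cons]; omega
  · simp only [List.length_cons]; omega

/-- A's per-region array construction. -/
def pvBuildA (cells : List (Int × Int)) (minr maxr minc maxc : Int) : List (List Bool) :=
  let base := List.replicate ((maxr - minr + 1) + 2).toNat
    (List.replicate ((maxc - minc + 1) + 2).toNat false)
  cells.foldl (fun a p => pvSet2 a (p.1 - minr + 1) (p.2 - minc + 1) true) base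

def find_regions_as_local_arrays (matrix : List (List Bool)) : List (List (List Bool)) :=
  let rows : Int := PySem.List.len matrix
  let cols : Int := PySem.List.len (PySem.List.pyGetD matrix 0 [])
  let visited0 : List (List Bool) := List.replicate rows.toNat (List.replicate cols.toNat false)
  ((PySem.List.pyRange 0 rows 1).foldl (fun st r =>
    (PySem.List.pyRange 0 cols 1).foldl (fun st c =>
      if pvGet2 matrix r c && !(pvGet2 st.1 r c) then
        let res := pvDfsA matrix rows cols [(r, c)] st.1 [] rows (-1) cols (-1)
        (res.2.2.2.2.2,
         st.2 ++ [pvBuildA res.1 res.2.1 res.2.2.1 res.2.2.2.1 res.2.2.2.2.1])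
      else st) st)
    (visited0, ([] : List (List (List Bool))))).2

-- ===== PORT B =====

/-- number of in-bounds cells not yet in the visited set (termination measure only). -/
def pvUnvis (rows cols : Int) (vis : PySem.Set (Int × Int)) : Nat :=
  (((PySem.List.pyRange 0 rows 1).flatMap fun x =>
      (PySem.List.pyRange 0 cols 1).map fun y => (x, y)).filter
    (fun p => !(PySem.Set.contains vis p))).length

/-- one neighbour test of B's inner `for` loop: bounds, unvisited, then the matrix bit. -/
def pvStepB (matrix : List (List Bool)) (rows cols : Int)
    (s : PySem.Set (Int × Int) × List (Int × Int)) (p : Int × Int) :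
    PySem.Set (Int × Int) × List (Int × Int) :=
  if decide (0 ≤ p.1) && decide (p.1 < rows) && decide (0 ≤ p.2) && decide (p.2 < cols) &&
      !(PySem.Set.contains s.1 p) && pvGet2 matrix p.1 p.2 then
    (PySem.Set.add s.1 p, s.2 ++ [p])
  else s

theorem pvLenFilt_le {α : Type} (p q : α → Bool) (h : ∀ a, q a = true → p a = true) :
    ∀ t : List α, (t.filter q).length ≤ (t.filter p).length := by
  intro t
  induction t with
  | nil => simp
  | cons a t ih =>
    by_cases hq : q a = true
    · simp [hq, h a hq]; omega
    · simp only [List.filter_cons, Bool.not_eq_true] at *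
      rw [hq]
      by_cases hp : p a = true <;> simp [hp] <;> omega

theorem pvLenFilt_lt {α : Type} (p q : α → Bool) (x : α)
    (hpq : ∀ a, q a = true → p a = true) (hpx : p x = true) (hqx : q x = false) :
    ∀ l : List α, x ∈ l → (l.filter q).length < (l.filter p).length := by
  intro l hx
  induction l with
  | nil => cases hx
  | cons a t ih =>
    rcases List.mem_cons.1 hx with rfl | hat
    · have := pvLenFilt_le p q hpq t
      simp [hqx, hpx]; omega
    · have := ih hat
      by_cases hq : q a = true
      · simp [hq, hpq a hq]; omega
      · simp only [Bool.not_eq_true] at hq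
        simp only [List.filter_cons, hq]
        by_cases hp : p a = true <;> simp [hp] <;> omega

theorem pvUnvis_add_lt (rows cols : Int) (vis : PySem.Set (Int × Int)) (p : Int × Int)
    (h1 : 0 ≤ p.1) (h2 : p.1 < rows) (h3 : 0 ≤ p.2) (h4 : p.2 < cols)
    (h5 : PySem.Set.contains vis p = false) :
    pvUnvis rows cols (PySem.Set.add vis p) < pvUnvis rows cols vis := by
  have hnp : p ∉ vis := fun hm => by
    rw [(PySem.Set.contains_iff _ _).2 hm] at h5; cases h5
  apply pvLenFilt_lt (fun q => !(PySem.Set.contains vis q))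
    (fun q => !(PySem.Set.contains (PySem.Set.add vis p) q)) p
  · intro a ha
    simp only [Bool.not_eq_true'] at *
    rcases Bool.eq_false_or_eq_true (PySem.Set.contains vis a) with ht | hf
    · exfalso
      have hma : a ∈ PySem.Set.add vis p :=
        (PySem.Set.mem_add _ _ _).2 (Or.inl ((PySem.Set.contains_iff _ _).1 ht))
      rw [(PySem.Set.contains_iff _ _).2 hma] at ha; cases ha
    · exact hf
  · simp only [Bool.not_eq_true']
    simpa using hnp
  · simp
  · rw [List.mem_flatMap]
    exact ⟨p.1, by rw [PySem.List.mem_pyRange_one]; omega,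
      List.mem_map.2 ⟨p.2, by rw [PySem.List.mem_pyRange_one]; omega, rfl⟩⟩

theorem pvStepB_measure (matrix : List (List Bool)) (rows cols : Int)
    (l : List (Int × Int)) : ∀ (vis : PySem.Set (Int × Int)) (acc : List (Int × Int)),
    5 * pvUnvis rows cols (l.foldl (pvStepB matrix rows cols) (vis, acc)).1 +
      (l.foldl (pvStepB matrix rows cols) (vis, acc)).2.length ≤
    5 * pvUnvis rows cols vis + acc.length := by
  induction l with
  | nil => intro vis acc; simp
  | cons d t ih =>
    intro vis acc
    simp only [List.foldl_cons]
    by_cases hc : (decide (0 ≤ d.1) && decide (d.1 < rows) && decide (0 ≤ d.2) &&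
        decide (d.2 < cols) && !(PySem.Set.contains vis d) && pvGet2 matrix d.1 d.2) = true
    · have hstep : pvStepB matrix rows cols (vis, acc) d =
          (PySem.Set.add vis d, acc ++ [d]) := by simp only [pvStepB]; rw [if_pos hc]
      rw [hstep]
      have := ih (PySem.Set.add vis d) (acc ++ [d])
      simp only [Bool.and_eq_true, Bool.not_eq_true', decide_eq_true_eq] at hc
      have hlt := pvUnvis_add_lt rows cols vis d hc.1.1.1.1.1 hc.1.1.1.1.2 hc.1.1.1.2
        hc.1.1.2 hc.1.2
      simp only [List.length_append, List.length_cons, List.length_nil] at *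
      omega
    · have hstep : pvStepB matrix rows cols (vis, acc) d = (vis, acc) := by
        simp only [pvStepB]; rw [if_neg hc]
      rw [hstep]
      exact ih vis acc

/-- B's BFS while-loop: `pending` is `queue[head:]`; `queue` accumulates the whole component. -/
def pvBfsB (matrix : List (List Bool)) (rows cols : Int) :
    List (Int × Int) → List (Int × Int) → PySem.Set (Int × Int) →
    List (Int × Int) × PySem.Set (Int × Int)
  | [], queue, vis => (queue, vis)
  | (x, y) :: rest, queue, vis =>
    let r := (pvNbrs x y).foldl (pvStepB matrix rows cols) (vis, [])
    pvBfsB matrix rows cols (rest ++ r.2) (queue ++ r.2) r.1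
  termination_by pending _ vis => 5 * pvUnvis rows cols vis + pending.length
  decreasing_by
    have := pvStepB_measure matrix rows cols (pvNbrs x y) vis []
    simp only [List.length_append, List.length_cons, List.length_nil] at *
    omega

/-- B's per-region array: a membership comprehension over the collected component. -/
def pvBuildB (queue : List (Int × Int)) : Option (List (List Bool)) :=
  match PySem.List.min? (queue.map Prod.fst) (fun v => v),
        PySem.List.max? (queue.map Prod.fst) (fun v => v),
        PySem.List.min? (queue.map Prod.snd) (fun v => v),
        PySem.List.max? (queue.map Prod.snd) (fun v => v) with
  | some minr, some maxr, some minc, some maxc =>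
    let cellset : PySem.Set (Int × Int) := PySem.Set.ofList queue
    some ((PySem.List.pyRange 0 (maxr - minr + 3) 1).map fun i =>
      (PySem.List.pyRange 0 (maxc - minc + 3) 1).map fun j =>
        PySem.Set.contains cellset (minr - 1 + i, minc - 1 + j))
  | _, _, _, _ => none  -- min/max of an empty sequence: never reached (the queue holds the seed)

def find_regions_as_local_arrays_alt (matrix : List (List Bool)) : List (List (List Bool)) :=
  let rows : Int := PySem.List.len matrix
  let cols : Int := PySem.List.len (PySem.List.pyGetD matrix 0 [])
  ((PySem.List.pyRange 0 rows 1).foldl (fun st r =>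
    (PySem.List.pyRange 0 cols 1).foldl (fun st c =>
      if pvGet2 matrix r c && !(PySem.Set.contains st.1 (r, c)) then
        let res := pvBfsB matrix rows cols [(r, c)] [(r, c)] (PySem.Set.add st.1 (r, c))
        (res.2, match pvBuildB res.1 with
                | some arr => st.2 ++ [arr]
                | none => st.2)
      else st) st)
    ((PySem.Set.empty : PySem.Set (Int × Int)), ([] : List (List (List Bool))))).2

-- ===== PRECONDITION & SPEC =====

-- Pre_ excludes exactly the inputs where Python A raises IndexError: the empty matrix
-- (`matrix[0]`) and matrices whose first row is longer than some later row (`matrix[r][c]`).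
def Pre_find_regions_as_local_arrays (matrix : List (List Bool)) : Prop :=
  matrix ≠ [] ∧ ∀ row ∈ matrix, matrix.headI.length ≤ row.length
instance (matrix : List (List Bool)) : Decidable (Pre_find_regions_as_local_arrays matrix) := by
  unfold Pre_find_regions_as_local_arrays; infer_instance

def pvWitness_find_regions_as_local_arrays : List (List Bool) := [[true, false], [true, true]]

def Spec_find_regions_as_local_arrays (matrix : List (List Bool)) (out : List (List (List Bool))) : Prop := out = find_regions_as_local_arrays_alt matrix
instance (matrix : List (List Bool)) (out : List (List (List Bool))) : Decidable (Spec_find_regions_as_local_arrays matrix out) := by unfold Spec_find_regions_as_local_arrays; infer_instance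

-- ===== CLAIM (what is proved, stated in full; the proofs are below) =====
def Claim_equal_find_regions_as_local_arrays : Prop := ∀ (matrix : List (List Bool)), Dom_find_regions_as_local_arrays matrix → Pre_find_regions_as_local_arrays matrix → Spec_find_regions_as_local_arrays matrix (find_regions_as_local_arrays matrix)

-- ===== LEMMAS AND PROOFS =====

/-! Abstract view shared by both proofs: true cells, 4-adjacency edges, reachability. -/

def pvTC (matrix : List (List Bool)) (p : Int × Int) : Prop :=
  0 ≤ p.1 ∧ p.1 < (matrix.length : Int) ∧ 0 ≤ p.2 ∧ p.2 < (matrix.headI.length : Int) ∧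
    pvGet2 matrix p.1 p.2 = true

def pvEdge (matrix : List (List Bool)) (p q : Int × Int) : Prop :=
  pvTC matrix p ∧ pvTC matrix q ∧ q ∈ pvNbrs p.1 p.2

def pvReach (matrix : List (List Bool)) (s c : Int × Int) : Prop :=
  Relation.ReflTransGen (pvEdge matrix) s c

/-- membership in A's 2D visited array, as a set of (nonnegative) cells. -/
def pvVM (v : List (List Bool)) (p : Int × Int) : Prop :=
  0 ≤ p.1 ∧ 0 ≤ p.2 ∧ pvGet2 v p.1 p.2 = true

def pvShapeN (v : List (List Bool)) (H W : Nat) : Prop :=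
  v.length = H ∧ ∀ row ∈ v, row.length = W

def pvShape (matrix : List (List Bool)) (v : List (List Bool)) : Prop :=
  pvShapeN v matrix.length matrix.headI.length

theorem pvNbrs_symm (p q : Int × Int) : q ∈ pvNbrs p.1 p.2 → p ∈ pvNbrs q.1 q.2 := by
  obtain ⟨a, b⟩ := p; obtain ⟨c, d⟩ := q
  simp only [pvNbrs, List.mem_cons, Prod.mk.injEq, List.not_mem_nil, or_false]
  omega

theorem pvEdge_symm (matrix : List (List Bool)) (p q : Int × Int) :
    pvEdge matrix p q → pvEdge matrix q p :=
  fun ⟨hp, hq, hn⟩ => ⟨hq, hp, pvNbrs_symm p q hn⟩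

theorem pvReach_symm (matrix : List (List Bool)) (s c : Int × Int) :
    pvReach matrix s c → pvReach matrix c s :=
  fun h => Relation.ReflTransGen.symmetric (fun _ _ => pvEdge_symm matrix _ _) h

theorem pvReach_tc (matrix : List (List Bool)) (s c : Int × Int) (hs : pvTC matrix s)
    (h : pvReach matrix s c) : pvTC matrix c := by
  induction h with
  | refl => exact hs
  | tail _ e _ => exact e.2.1

theorem pvClosed_reach (matrix : List (List Bool)) (V : Int × Int → Prop)
    (hcl : ∀ p q, V p → pvEdge matrix p q → V q) (p q : Int × Int)
    (hp : V p) (h : pvReach matrix p q) : V q := by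
  induction h with
  | refl => exact hp
  | tail _ e ih => exact hcl _ _ ih e

theorem pvReach_not_V0 (matrix : List (List Bool)) (V0 : Int × Int → Prop)
    (hcl : ∀ p q, V0 p → pvEdge matrix p q → V0 q) (s c : Int × Int)
    (hs : ¬ V0 s) (h : pvReach matrix s c) : ¬ V0 c := by
  intro hc
  exact hs (pvClosed_reach matrix V0 hcl c s hc (pvReach_symm matrix s c h))

/-! 2D get/set bookkeeping for A's visited array and region arrays. -/

theorem pvGet2_nonneg (v : List (List Bool)) (i j : Int) (hi : 0 ≤ i) (hj : 0 ≤ j) :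
    pvGet2 v i j = ((v[i.toNat]?).bind fun row => row[j.toNat]?).getD false := by
  simp [pvGet2, PySem.List.pyGet?_of_nonneg _ hi]
  cases v[i.toNat]? with
  | none => rfl
  | some row => simp [PySem.List.pyGet?_of_nonneg _ hj]

theorem pvSet2_eq (v : List (List Bool)) (x y : Int) (b : Bool) (hx : 0 ≤ x) (hy : 0 ≤ y) :
    pvSet2 v x y b =
      v.set x.toNat ((PySem.List.pyGetD v x []).set y.toNat b) := by
  simp [pvSet2, PySem.List.pySetD_of_nonneg _ _ hx, PySem.List.pySetD_of_nonneg _ _ hy]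

theorem pvShapeN_set2 (v : List (List Bool)) (H W : Nat) (x y : Int) (b : Bool)
    (hs : pvShapeN v H W) (hx : 0 ≤ x) (hy : 0 ≤ y) :
    pvShapeN (pvSet2 v x y b) H W := by
  rw [pvSet2_eq v x y b hx hy]
  by_cases hlt : x.toNat < v.length
  · have hrow : PySem.List.pyGetD v x [] = v[x.toNat] := by
      rw [PySem.List.pyGetD, PySem.List.pyGet?_of_nonneg _ hx,
        List.getElem?_eq_getElem hlt]; rfl
    refine ⟨by simp [hs.1], ?_⟩
    intro row hmem
    rcases List.mem_or_eq_of_mem_set hmem with hm | rfl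
    · exact hs.2 row hm
    · rw [List.length_set, hrow]
      exact hs.2 _ (List.getElem_mem hlt)
  · rw [List.set_eq_of_length_le (by omega)]
    exact hs

theorem pvShape_set2 (matrix v : List (List Bool)) (x y : Int) (b : Bool)
    (hs : pvShape matrix v) (hx : 0 ≤ x) (hy : 0 ≤ y) :
    pvShape matrix (pvSet2 v x y b) :=
  pvShapeN_set2 v matrix.length matrix.headI.length x y b hs hx hy

theorem pvGet2_set2 (v : List (List Bool)) (x y i j : Int) (b : Bool)
    (hx : 0 ≤ x) (hy : 0 ≤ y) (hi : 0 ≤ i) (hj : 0 ≤ j)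
    (hxr : x.toNat < v.length) (hyr : y.toNat < (v[x.toNat]).length) :
    pvGet2 (pvSet2 v x y b) i j = if i = x ∧ j = y then b else pvGet2 v i j := by
  rw [pvSet2_eq v x y b hx hy, pvGet2_nonneg _ i j hi hj, pvGet2_nonneg v i j hi hj]
  have hrow : PySem.List.pyGetD v x [] = v[x.toNat] := by
    rw [PySem.List.pyGetD, PySem.List.pyGet?_of_nonneg _ hx,
      List.getElem?_eq_getElem hxr]; rfl
  by_cases hix : i = x
  · subst hix
    rw [List.getElem?_set_self (by omega)]
    simp only [Option.bind_some, hrow]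
    by_cases hjy : j = y
    · subst hjy
      rw [List.getElem?_set_self hyr]
      simp
    · rw [if_neg (fun hc => hjy hc.2), List.getElem?_set_ne (by omega)]
      simp [List.getElem?_eq_getElem hxr]
  · rw [if_neg (fun hc => hix hc.1), List.getElem?_set_ne (by omega)]

theorem pvVM_set2 (matrix v : List (List Bool)) (x y : Int)
    (hs : pvShape matrix v) (hx : 0 ≤ x) (hxr : x < (matrix.length : Int))
    (hy : 0 ≤ y) (hyr : y < (matrix.headI.length : Int)) :
    ∀ p, pvVM (pvSet2 v x y true) p ↔ pvVM v p ∨ p = (x, y) := by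
  have hxl : x.toNat < v.length := by rw [hs.1]; omega
  have hrl : (v[x.toNat]).length = matrix.headI.length := hs.2 _ (List.getElem_mem hxl)
  intro ⟨i, j⟩
  by_cases hij : 0 ≤ i ∧ 0 ≤ j
  · have := pvGet2_set2 v x y i j true hx hy hij.1 hij.2 hxl (by omega)
    simp only [pvVM, this, Prod.mk.injEq]
    by_cases hc : i = x ∧ j = y
    · rw [if_pos hc]
      simp [hc.1, hc.2, hx, hy]
    · rw [if_neg hc]; tauto
  · simp only [pvVM, Prod.mk.injEq]
    constructor
    · intro ⟨h1, h2, _⟩; exact absurd ⟨h1, h2⟩ hij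
    · rintro (⟨h1, h2, _⟩ | ⟨rfl, rfl⟩)
      · exact absurd ⟨h1, h2⟩ hij
      · exact absurd ⟨hx, hy⟩ hij

theorem pvGet2?_some_of_shape (matrix v : List (List Bool)) (x y : Int)
    (hs : pvShape matrix v) (hx : 0 ≤ x) (hxr : x < (matrix.length : Int))
    (hy : 0 ≤ y) (hyr : y < (matrix.headI.length : Int)) :
    pvGet2? v x y = some (pvGet2 v x y) := by
  have hxl : x.toNat < v.length := by rw [hs.1]; omega
  have hrl : (v[x.toNat]).length = matrix.headI.length := hs.2 _ (List.getElem_mem hxl)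
  simp only [pvGet2?, pvGet2, PySem.List.pyGet?_of_nonneg _ hx,
    List.getElem?_eq_getElem hxl, Option.bind_some,
    PySem.List.pyGet?_of_nonneg _ hy, List.getElem?_eq_getElem (show y.toNat < (v[x.toNat]).length by omega)]
  rfl

theorem pvIsValidA_iff (matrix v : List (List Bool)) (r c : Int) :
    pvIsValidA matrix v (matrix.length : Int) (matrix.headI.length : Int) r c = true ↔
      pvTC matrix (r, c) ∧ ¬ pvVM v (r, c) := by
  simp only [pvIsValidA, Bool.and_eq_true, decide_eq_true_eq, pvTC, pvVM,
    Bool.not_eq_true']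
  constructor
  · rintro ⟨⟨⟨⟨⟨h1, h2⟩, h3⟩, h4⟩, h5⟩, h6⟩
    exact ⟨⟨h1, h2, h3, h4, h5⟩, by rw [h6]; simp⟩
  · rintro ⟨⟨h1, h2, h3, h4, h5⟩, h6⟩
    refine ⟨⟨⟨⟨⟨h1, h2⟩, h3⟩, h4⟩, h5⟩, ?_⟩
    rcases Bool.eq_false_or_eq_true (pvGet2 v r c) with ht | hf
    · exact absurd ⟨h1, h3, ht⟩ h6
    · exact hf


/-! The DFS flood-fill invariant: A's `dfs` visits exactly the old set plus the seed's component. -/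

structure PvDfsInv (matrix : List (List Bool)) (s : Int × Int) (V0 : Int × Int → Prop)
    (stack : List (Int × Int)) (visited : List (List Bool)) (cells : List (Int × Int))
    (minr maxr minc maxc : Int) : Prop where
  shape : pvShape matrix visited
  stack_ok : ∀ p ∈ stack, pvTC matrix p ∧ pvReach matrix s p
  sub : ∀ p, V0 p → pvVM visited p
  vis_sub : ∀ p, pvVM visited p → V0 p ∨ (pvTC matrix p ∧ pvReach matrix s p)
  frontier : ∀ p q, pvVM visited p → pvEdge matrix p q → pvVM visited q ∨ q ∈ stack
  cells_iff : ∀ p, p ∈ cells ↔ (pvVM visited p ∧ ¬ V0 p)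
  seed : pvVM visited s ∨ s ∈ stack
  acc_minr : minr = cells.foldl (fun a p => min a p.1) (matrix.length : Int)
  acc_maxr : maxr = cells.foldl (fun a p => max a p.1) (-1)
  acc_minc : minc = cells.foldl (fun a p => min a p.2) (matrix.headI.length : Int)
  acc_maxc : maxc = cells.foldl (fun a p => max a p.2) (-1)

structure PvDfsOut (matrix : List (List Bool)) (s : Int × Int) (V0 : Int × Int → Prop)
    (res : List (Int × Int) × Int × Int × Int × Int × List (List Bool)) : Prop where
  cells_iff : ∀ p, p ∈ res.1 ↔ pvReach matrix s p
  vis_iff : ∀ p, pvVM res.2.2.2.2.2 p ↔ V0 p ∨ pvReach matrix s p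
  shape : pvShape matrix res.2.2.2.2.2
  acc_minr : res.2.1 = res.1.foldl (fun a p => min a p.1) (matrix.length : Int)
  acc_maxr : res.2.2.1 = res.1.foldl (fun a p => max a p.1) (-1)
  acc_minc : res.2.2.2.1 = res.1.foldl (fun a p => min a p.2) (matrix.headI.length : Int)
  acc_maxc : res.2.2.2.2.1 = res.1.foldl (fun a p => max a p.2) (-1)

theorem pvDfsA_spec (matrix : List (List Bool)) (s : Int × Int) (V0 : Int × Int → Prop)
    (hV0cl : ∀ p q, V0 p → pvEdge matrix p q → V0 q)
    (hs : pvTC matrix s) (hsV0 : ¬ V0 s) :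
    ∀ stack visited cells minr maxr minc maxc,
      PvDfsInv matrix s V0 stack visited cells minr maxr minc maxc →
      PvDfsOut matrix s V0
        (pvDfsA matrix (matrix.length : Int) (matrix.headI.length : Int)
          stack visited cells minr maxr minc maxc) := by
  intro stack visited cells minr maxr minc maxc inv
  induction stack, visited, cells, minr, maxr, minc, maxc
    using pvDfsA.induct (matrix := matrix) (rows := (matrix.length : Int))
      (cols := (matrix.headI.length : Int)) with
  | case1 visited cells minr maxr minc maxc =>
    -- stack = []: the visited set is closed; it is exactly V0 ∪ the component of s
    rw [pvDfsA]
    have hvm_s : pvVM visited s := by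
      rcases inv.seed with h | h
      · exact h
      · cases h
    have hreach_vm : ∀ p, pvReach matrix s p → pvVM visited p := by
      intro p hp
      induction hp with
      | refl => exact hvm_s
      | tail _ e ih =>
        rcases inv.frontier _ _ ih e with h | h
        · exact h
        · cases h
    refine ⟨?_, ?_, inv.shape, inv.acc_minr, inv.acc_maxr, inv.acc_minc, inv.acc_maxc⟩
    · intro p
      rw [inv.cells_iff p]
      constructor
      · rintro ⟨hvm, hnV0⟩
        rcases inv.vis_sub p hvm with h | h
        · exact absurd h hnV0
        · exact h.2
      · intro hr
        exact ⟨hreach_vm p hr, pvReach_not_V0 matrix V0 hV0cl s p hsV0 hr⟩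
    · intro p
      constructor
      · intro hvm
        rcases inv.vis_sub p hvm with h | h
        · exact Or.inl h
        · exact Or.inr h.2
      · rintro (h | h)
        · exact inv.sub p h
        · exact hreach_vm p h
  | case2 x y rest visited cells minr maxr minc maxc h hv hp ih =>
    -- pop an unvisited cell: mark it, record it, push its valid neighbours
    rw [pvDfsA]
    split
    case h_2 => rw [h] at *; simp_all
    case h_3 => rw [h] at *; simp_all
    case h_1 heq =>
    clear heq
    obtain ⟨htc, hreach⟩ := inv.stack_ok (x, y) (List.mem_cons_self ..)
    obtain ⟨hx0, hxr, hy0, hyr, hmt⟩ := id htc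
    have hnv : ¬ pvVM visited (x, y) := by
      intro hvm
      have : pvGet2 visited x y = true := hvm.2.2
      simp only [pvGet2, pvGet2?] at this h
      rw [h] at this; cases this
    have hvm' := pvVM_set2 matrix visited x y inv.shape hx0 hxr hy0 hyr
    have hshape' := pvShape_set2 matrix visited x y true inv.shape hx0 hy0
    have hnV0xy : ¬ V0 (x, y) := fun hv => hnv (inv.sub _ hv)
    have hpush : ∀ q, q ∈ (pvNbrs x y).filter
        (fun p => pvIsValidA matrix (pvSet2 visited x y true) (matrix.length : Int)
          (matrix.headI.length : Int) p.1 p.2) ↔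
        q ∈ pvNbrs x y ∧ pvTC matrix q ∧ ¬ pvVM (pvSet2 visited x y true) q := by
      intro q
      rw [List.mem_filter]
      constructor
      · rintro ⟨h1, h2⟩
        obtain ⟨a, b⟩ := q
        exact ⟨h1, (pvIsValidA_iff matrix _ a b).1 h2⟩
      · rintro ⟨h1, h2⟩
        obtain ⟨a, b⟩ := q
        exact ⟨h1, (pvIsValidA_iff matrix _ a b).2 h2⟩
    have hstk : ∀ q, q ∈ (((pvNbrs x y).filter
        (fun p => pvIsValidA matrix (pvSet2 visited x y true) (matrix.length : Int)
          (matrix.headI.length : Int) p.1 p.2)).foldl (fun st n => n :: st) rest) ↔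
        (q ∈ pvNbrs x y ∧ pvTC matrix q ∧ ¬ pvVM (pvSet2 visited x y true) q) ∨ q ∈ rest := by
      intro q
      rw [List.foldl_flip_cons_eq_append', List.mem_append, List.mem_reverse, hpush]
    apply ih
    constructor
    · exact hshape'
    · intro p hp
      rcases (hstk p).1 hp with ⟨hn, htcp, _⟩ | hr
      · exact ⟨htcp, hreach.tail ⟨htc, htcp, hn⟩⟩
      · exact inv.stack_ok p (List.mem_cons_of_mem _ hr)
    · intro p hp
      exact (hvm' p).2 (Or.inl (inv.sub p hp))
    · intro p hp
      rcases (hvm' p).1 hp with hvm | rfl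
      · exact inv.vis_sub p hvm
      · exact Or.inr ⟨htc, hreach⟩
    · intro p q hp he
      rcases (hvm' p).1 hp with hvm | rfl
      · rcases inv.frontier p q hvm he with h1 | h1
        · exact Or.inl ((hvm' q).2 (Or.inl h1))
        · rcases List.mem_cons.1 h1 with rfl | h2
          · exact Or.inl ((hvm' _).2 (Or.inr rfl))
          · exact Or.inr ((hstk q).2 (Or.inr h2))
      · by_cases hq : pvVM (pvSet2 visited x y true) q
        · exact Or.inl hq
        · exact Or.inr ((hstk q).2 (Or.inl ⟨he.2.2, he.2.1, hq⟩))
    · intro p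
      rw [List.mem_append, List.mem_singleton, inv.cells_iff p]
      constructor
      · rintro (⟨hvm, hn⟩ | rfl)
        · exact ⟨(hvm' p).2 (Or.inl hvm), hn⟩
        · exact ⟨(hvm' _).2 (Or.inr rfl), hnV0xy⟩
      · rintro ⟨hvm, hn⟩
        rcases (hvm' p).1 hvm with h1 | rfl
        · exact Or.inl ⟨h1, hn⟩
        · exact Or.inr rfl
    · rcases inv.seed with h1 | h1
      · exact Or.inl ((hvm' s).2 (Or.inl h1))
      · rcases List.mem_cons.1 h1 with rfl | h2
        · exact Or.inl ((hvm' _).2 (Or.inr rfl))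
        · exact Or.inr ((hstk s).2 (Or.inr h2))
    · rw [List.foldl_append, ← inv.acc_minr]; rfl
    · rw [List.foldl_append, ← inv.acc_maxr]; rfl
    · rw [List.foldl_append, ← inv.acc_minc]; rfl
    · rw [List.foldl_append, ← inv.acc_maxc]; rfl
  | case3 x y rest visited cells minr maxr minc maxc h ih =>
    -- pop an already-visited cell: lazy deletion
    rw [pvDfsA]
    split
    case h_1 => rw [h] at *; simp_all
    case h_3 => rw [h] at *; simp_all
    case h_2 heq =>
    obtain ⟨htc, _⟩ := inv.stack_ok (x, y) (List.mem_cons_self ..)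
    have hvm : pvVM visited (x, y) := by
      refine ⟨htc.1, htc.2.2.1, ?_⟩
      simp only [pvGet2, pvGet2?] at h ⊢
      rw [h]; rfl
    apply ih
    refine ⟨inv.shape, fun p hp => inv.stack_ok p (List.mem_cons_of_mem _ hp),
      inv.sub, inv.vis_sub, ?_, inv.cells_iff, ?_,
      inv.acc_minr, inv.acc_maxr, inv.acc_minc, inv.acc_maxc⟩
    · intro p q hp he
      rcases inv.frontier p q hp he with h1 | h1
      · exact Or.inl h1
      · rcases List.mem_cons.1 h1 with rfl | h2
        · exact Or.inl hvm
        · exact Or.inr h2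
    · rcases inv.seed with h1 | h1
      · exact Or.inl h1
      · rcases List.mem_cons.1 h1 with rfl | h2
        · exact Or.inl hvm
        · exact Or.inr h2
  | case4 x y rest visited cells minr maxr minc maxc h ih =>
    -- out-of-range read: impossible, every stack cell is in bounds
    exfalso
    obtain ⟨htc, _⟩ := inv.stack_ok (x, y) (List.mem_cons_self ..)
    obtain ⟨hx0, hxr, hy0, hyr, hmt⟩ := id htc
    have := pvGet2?_some_of_shape matrix visited x y inv.shape hx0 hxr hy0 hyr
    rw [h] at this; cases this


/-! The BFS invariant: B's queue collects exactly the seed's component. -/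

theorem pvStepB_cond (matrix : List (List Bool)) (vis : PySem.Set (Int × Int)) (p : Int × Int) :
    (decide (0 ≤ p.1) && decide (p.1 < (matrix.length : Int)) && decide (0 ≤ p.2) &&
      decide (p.2 < (matrix.headI.length : Int)) && !(PySem.Set.contains vis p) &&
      pvGet2 matrix p.1 p.2) = true ↔ pvTC matrix p ∧ p ∉ vis := by
  simp only [Bool.and_eq_true, decide_eq_true_eq, Bool.not_eq_true', pvTC]
  constructor
  · rintro ⟨⟨⟨⟨⟨h1, h2⟩, h3⟩, h4⟩, h5⟩, h6⟩
    refine ⟨⟨h1, h2, h3, h4, h6⟩, fun hm => ?_⟩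
    rw [(PySem.Set.contains_iff _ _).2 hm] at h5; cases h5
  · rintro ⟨⟨h1, h2, h3, h4, h6⟩, h5⟩
    refine ⟨⟨⟨⟨⟨h1, h2⟩, h3⟩, h4⟩, ?_⟩, h6⟩
    rcases Bool.eq_false_or_eq_true (PySem.Set.contains vis p) with ht | hf
    · exact absurd ((PySem.Set.contains_iff _ _).1 ht) h5
    · exact hf

theorem pvBfold (matrix : List (List Bool)) (l : List (Int × Int)) :
    ∀ (vis : PySem.Set (Int × Int)) (acc : List (Int × Int)),
    (∀ p, p ∈ (l.foldl (pvStepB matrix (matrix.length : Int) (matrix.headI.length : Int))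
        (vis, acc)).1 ↔ p ∈ vis ∨ (p ∈ l ∧ pvTC matrix p)) ∧
    (∀ p, p ∈ (l.foldl (pvStepB matrix (matrix.length : Int) (matrix.headI.length : Int))
        (vis, acc)).2 ↔ p ∈ acc ∨
          (p ∈ (l.foldl (pvStepB matrix (matrix.length : Int) (matrix.headI.length : Int))
            (vis, acc)).1 ∧ p ∉ vis)) := by
  induction l with
  | nil => intro vis acc; simp
  | cons d t ih =>
    intro vis acc
    simp only [List.foldl_cons]
    by_cases hc : pvTC matrix d ∧ d ∉ vis
    · have hstep : pvStepB matrix (matrix.length : Int) (matrix.headI.length : Int)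
          (vis, acc) d = (PySem.Set.add vis d, acc ++ [d]) := by
        simp only [pvStepB]
        rw [if_pos ((pvStepB_cond matrix vis d).2 hc)]
      rw [hstep]
      obtain ⟨ih1, ih2⟩ := ih (PySem.Set.add vis d) (acc ++ [d])
      have hvd : ∀ p, p ∈ PySem.Set.add vis d ↔ p ∈ vis ∨ p = d :=
        fun p => PySem.Set.mem_add vis d p
      constructor
      · intro p
        rw [ih1 p, hvd p, List.mem_cons]
        rcases hc with ⟨htc, _⟩
        constructor
        · rintro ((h | rfl) | ⟨h1, h2⟩) <;> tauto
        · rintro (h | ⟨(rfl | h1), h2⟩) <;> tauto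
      · intro p
        rw [ih2 p, ih1 p, hvd p, List.mem_append, List.mem_singleton]
        have hd2 := hc.2
        constructor
        · rintro ((h | rfl) | ⟨h1, h2⟩)
          · exact Or.inl h
          · exact Or.inr ⟨Or.inl (Or.inr rfl), hd2⟩
          · exact Or.inr ⟨h1, fun hv => h2 (Or.inl hv)⟩
        · rintro (h | ⟨h1, h2⟩)
          · exact Or.inl (Or.inl h)
          · by_cases hpd : p = d
            · exact Or.inl (Or.inr hpd)
            · refine Or.inr ⟨h1, fun hv => ?_⟩
              rcases hv with hv | rfl
              · exact h2 hv
              · exact hpd rfl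
    · have hstep : pvStepB matrix (matrix.length : Int) (matrix.headI.length : Int)
          (vis, acc) d = (vis, acc) := by
        simp only [pvStepB]
        rw [if_neg (fun hct => hc ((pvStepB_cond matrix vis d).1 hct))]
      rw [hstep]
      obtain ⟨ih1, ih2⟩ := ih vis acc
      constructor
      · intro p
        rw [ih1 p, List.mem_cons]
        constructor
        · tauto
        · rintro (h | ⟨(rfl | h1), h2⟩)
          · tauto
          · left
            by_contra hnv
            exact hc ⟨h2, hnv⟩
          · tauto
      · exact ih2

structure PvBfsInv (matrix : List (List Bool)) (s : Int × Int) (V0 : Int × Int → Prop)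
    (pending queue : List (Int × Int)) (vis : PySem.Set (Int × Int)) : Prop where
  q_ok : ∀ p ∈ queue, pvTC matrix p ∧ pvReach matrix s p ∧ ¬ V0 p
  pend_sub : ∀ p ∈ pending, p ∈ queue
  vis_iff : ∀ p, p ∈ vis ↔ V0 p ∨ p ∈ queue
  closed : ∀ p ∈ queue, p ∉ pending → ∀ q, pvEdge matrix p q → q ∈ vis
  seed_in : s ∈ queue

theorem pvBfsB_spec (matrix : List (List Bool)) (s : Int × Int) (V0 : Int × Int → Prop)
    (hV0cl : ∀ p q, V0 p → pvEdge matrix p q → V0 q) (hsV0 : ¬ V0 s) :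
    ∀ pending queue vis, PvBfsInv matrix s V0 pending queue vis →
      (∀ p, p ∈ (pvBfsB matrix (matrix.length : Int) (matrix.headI.length : Int)
          pending queue vis).1 ↔ pvReach matrix s p) ∧
      (∀ p, p ∈ (pvBfsB matrix (matrix.length : Int) (matrix.headI.length : Int)
          pending queue vis).2 ↔ V0 p ∨ pvReach matrix s p) := by
  intro pending queue vis inv
  induction pending, queue, vis
    using pvBfsB.induct (matrix := matrix) (rows := (matrix.length : Int))
      (cols := (matrix.headI.length : Int)) with
  | case1 queue vis =>
    rw [pvBfsB]
    have hq : ∀ p, p ∈ queue ↔ pvReach matrix s p := by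
      intro p
      constructor
      · intro hp; exact (inv.q_ok p hp).2.1
      · intro hp
        induction hp with
        | refl => exact inv.seed_in
        | @tail b c hab e ihb =>
          have hb : b ∈ queue := ihb
          have hc : c ∈ vis := inv.closed b hb (List.not_mem_nil) c e
          rcases (inv.vis_iff c).1 hc with h | h
          · exfalso
            exact pvReach_not_V0 matrix V0 hV0cl s c hsV0 (hab.tail e) h
          · exact h
    exact ⟨hq, fun p => by rw [inv.vis_iff p, hq p]⟩
  | case2 x y rest queue vis r ih =>
    rw [pvBfsB]
    obtain ⟨htc, hreach, hnV0⟩ := inv.q_ok (x, y) (inv.pend_sub _ (List.mem_cons_self ..))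
    obtain ⟨hF1, hF2⟩ := pvBfold matrix (pvNbrs x y) vis []
    simp only [List.not_mem_nil, false_or] at hF2
    apply ih
    constructor
    · intro p hp
      rcases List.mem_append.1 hp with h | h
      · exact inv.q_ok p h
      · obtain ⟨hp1, hpv⟩ := (hF2 p).1 h
        rcases (hF1 p).1 hp1 with h2 | ⟨hn, htcp⟩
        · exact absurd h2 hpv
        · have hnV0p : ¬ V0 p := fun hv => hpv ((inv.vis_iff p).2 (Or.inl hv))
          exact ⟨htcp, hreach.tail ⟨htc, htcp, hn⟩, hnV0p⟩
    · intro p hp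
      rcases List.mem_append.1 hp with h | h
      · exact List.mem_append.2 (Or.inl (inv.pend_sub p (List.mem_cons_of_mem _ h)))
      · exact List.mem_append.2 (Or.inr h)
    · intro p
      rw [List.mem_append, hF1 p]
      constructor
      · rintro (h | ⟨hn, htcp⟩)
        · rcases (inv.vis_iff p).1 h with h1 | h1
          · exact Or.inl h1
          · exact Or.inr (Or.inl h1)
        · by_cases hv : p ∈ vis
          · rcases (inv.vis_iff p).1 hv with h1 | h1
            · exact Or.inl h1
            · exact Or.inr (Or.inl h1)
          · exact Or.inr (Or.inr ((hF2 p).2 ⟨(hF1 p).2 (Or.inr ⟨hn, htcp⟩), hv⟩))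
      · rintro (h | h | h)
        · exact Or.inl ((inv.vis_iff p).2 (Or.inl h))
        · exact Or.inl ((inv.vis_iff p).2 (Or.inr h))
        · exact (hF1 p).1 ((hF2 p).1 h).1
    · intro p hp hnp q he
      by_cases hpxy : p = (x, y)
      · rw [hF1 q]
        by_cases hqv : q ∈ vis
        · exact Or.inl hqv
        · refine Or.inr ⟨?_, he.2.1⟩
          have := he.2.2
          rw [hpxy] at this
          exact this
      · have hpq : p ∈ queue := by
          rcases List.mem_append.1 hp with h | h
          · exact h
          · exfalso
            exact hnp (List.mem_append.2 (Or.inr h))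
        have hnpold : p ∉ (x, y) :: rest := by
          intro hm
          rcases List.mem_cons.1 hm with rfl | hm2
          · exact hpxy rfl
          · exact hnp (List.mem_append.2 (Or.inl hm2))
        have := inv.closed p hpq hnpold q he
        rw [hF1 q]
        exact Or.inl this
    · exact List.mem_append.2 (Or.inl inv.seed_in)


/-! Equality of the two per-region arrays: both are determined by the component's cell set. -/

theorem pvFoldMinEq (f : Int × Int → Int) (cellsA cellsB : List (Int × Int))
    (hmem : ∀ p, p ∈ cellsA ↔ p ∈ cellsB) (s : Int × Int) (hsA : s ∈ cellsA)
    (R : Int) (hub : f s < R) (m : Int)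
    (hm : PySem.List.min? (cellsB.map f) (fun v => v) = some m) :
    cellsA.foldl (fun a p => min a (f p)) R = m := by
  have hfold : cellsA.foldl (fun a p => min a (f p)) R = (cellsA.map f).foldl min R :=
    (List.foldl_map).symm
  rw [hfold]
  obtain ⟨hle, hley⟩ := PySem.List.foldl_min_le (cellsA.map f) R
  have hmB := PySem.List.min?_mem hm
  have hmin := PySem.List.min?_isMin hm
  have hmA : m ∈ cellsA.map f := by
    obtain ⟨q, hq, rfl⟩ := List.mem_map.1 hmB
    exact List.mem_map.2 ⟨q, (hmem q).2 hq, rfl⟩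
  have h1 : (cellsA.map f).foldl min R ≤ m := hley m hmA
  have h2 : m ≤ (cellsA.map f).foldl min R := by
    rcases PySem.List.foldl_min_mem (cellsA.map f) R with he | hmem2
    · exfalso
      have := hley (f s) (List.mem_map.2 ⟨s, hsA, rfl⟩)
      omega
    · obtain ⟨q, hq, hfq⟩ := List.mem_map.1 hmem2
      rw [← hfq]
      exact hmin (f q) (List.mem_map.2 ⟨q, (hmem q).1 hq, rfl⟩)
  omega

theorem pvFoldMaxEq (f : Int × Int → Int) (cellsA cellsB : List (Int × Int))
    (hmem : ∀ p, p ∈ cellsA ↔ p ∈ cellsB) (s : Int × Int) (hsA : s ∈ cellsA)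
    (hlb : -1 < f s) (m : Int)
    (hm : PySem.List.max? (cellsB.map f) (fun v => v) = some m) :
    cellsA.foldl (fun a p => max a (f p)) (-1) = m := by
  have hfold : cellsA.foldl (fun a p => max a (f p)) (-1) = (cellsA.map f).foldl max (-1) :=
    (List.foldl_map).symm
  rw [hfold]
  obtain ⟨hle, hley⟩ := PySem.List.le_foldl_max (cellsA.map f) (-1)
  have hmB := PySem.List.max?_mem hm
  have hmax := PySem.List.max?_isMax hm
  have hmA : m ∈ cellsA.map f := by
    obtain ⟨q, hq, rfl⟩ := List.mem_map.1 hmB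
    exact List.mem_map.2 ⟨q, (hmem q).2 hq, rfl⟩
  have h1 : m ≤ (cellsA.map f).foldl max (-1) := hley m hmA
  have h2 : (cellsA.map f).foldl max (-1) ≤ m := by
    rcases PySem.List.foldl_max_mem (cellsA.map f) (-1) with he | hmem2
    · exfalso
      have := hley (f s) (List.mem_map.2 ⟨s, hsA, rfl⟩)
      omega
    · obtain ⟨q, hq, hfq⟩ := List.mem_map.1 hmem2
      rw [← hfq]
      exact hmax (f q) (List.mem_map.2 ⟨q, (hmem q).1 hq, rfl⟩)
  omega

theorem pvGet2_replicate (H W : Nat) (i j : Int) (hi : 0 ≤ i) (hj : 0 ≤ j) :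
    pvGet2 (List.replicate H (List.replicate W false)) i j = false := by
  rw [pvGet2_nonneg _ i j hi hj]
  by_cases hik : i.toNat < H
  · rw [List.getElem?_replicate_of_lt hik]
    simp only [Option.bind_some]
    by_cases hjk : j.toNat < W
    · rw [List.getElem?_replicate_of_lt hjk]; rfl
    · rw [List.getElem?_eq_none (by simp; omega)]; rfl
  · rw [List.getElem?_eq_none (by simp; omega)]; rfl

theorem pvBuildA_fold_get (minr minc : Int) (H W : Nat) :
    ∀ (cells : List (Int × Int)) (a : List (List Bool)), pvShapeN a H W →
    (∀ p ∈ cells, 0 ≤ p.1 - minr + 1 ∧ (p.1 - minr + 1).toNat < H ∧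
      0 ≤ p.2 - minc + 1 ∧ (p.2 - minc + 1).toNat < W) →
    ∀ i j : Int, 0 ≤ i → 0 ≤ j →
    (pvGet2 (cells.foldl (fun a p => pvSet2 a (p.1 - minr + 1) (p.2 - minc + 1) true) a) i j
        = true ↔
      pvGet2 a i j = true ∨ ∃ p ∈ cells, p.1 - minr + 1 = i ∧ p.2 - minc + 1 = j) := by
  intro cells
  induction cells with
  | nil => intro a _ _ i j _ _; simp
  | cons c t ih =>
    intro a hsh hbnd i j hi hj
    obtain ⟨hb1, hb2, hb3, hb4⟩ := hbnd c (List.mem_cons_self ..)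
    have hsh' := pvShapeN_set2 a H W (c.1 - minr + 1) (c.2 - minc + 1) true hsh hb1 hb3
    have hrec := ih (pvSet2 a (c.1 - minr + 1) (c.2 - minc + 1) true) hsh'
      (fun p hp => hbnd p (List.mem_cons_of_mem _ hp)) i j hi hj
    simp only [List.foldl_cons]
    rw [hrec]
    have hget := pvGet2_set2 a (c.1 - minr + 1) (c.2 - minc + 1) i j true hb1 hb3 hi hj
      (by rw [hsh.1]; exact hb2)
      (by rw [hsh.2 _ (List.getElem_mem (by rw [hsh.1]; exact hb2))]; exact hb4)
    rw [hget]
    by_cases hc : i = c.1 - minr + 1 ∧ j = c.2 - minc + 1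
    · rw [if_pos hc]
      constructor
      · intro _
        exact Or.inr ⟨c, List.mem_cons_self .., hc.1.symm, hc.2.symm⟩
      · intro _
        exact Or.inl rfl
    · rw [if_neg hc]
      constructor
      · rintro (h | ⟨p, hp, hpe⟩)
        · exact Or.inl h
        · exact Or.inr ⟨p, List.mem_cons_of_mem _ hp, hpe⟩
      · rintro (h | ⟨p, hp, hpe⟩)
        · exact Or.inl h
        · rcases List.mem_cons.1 hp with rfl | hp2
          · exact absurd ⟨hpe.1.symm, hpe.2.symm⟩ hc
          · exact Or.inr ⟨p, hp2, hpe⟩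

theorem pvShapeN_fold (minr minc : Int) (H W : Nat) :
    ∀ (cells : List (Int × Int)) (a : List (List Bool)), pvShapeN a H W →
    (∀ p ∈ cells, 0 ≤ p.1 - minr + 1 ∧ 0 ≤ p.2 - minc + 1) →
    pvShapeN (cells.foldl (fun a p => pvSet2 a (p.1 - minr + 1) (p.2 - minc + 1) true) a) H W := by
  intro cells
  induction cells with
  | nil => intro a h _; exact h
  | cons c t ih =>
    intro a hsh hbnd
    obtain ⟨hb1, hb3⟩ := hbnd c (List.mem_cons_self ..)
    exact ih _ (pvShapeN_set2 a H W _ _ true hsh hb1 hb3)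
      (fun p hp => hbnd p (List.mem_cons_of_mem _ hp))

theorem pvRegionEq (cellsA cellsB : List (Int × Int))
    (hmem : ∀ p, p ∈ cellsA ↔ p ∈ cellsB) (s : Int × Int) (hsA : s ∈ cellsA)
    (R C : Int) (hbnd : ∀ p ∈ cellsA, 0 ≤ p.1 ∧ p.1 < R ∧ 0 ≤ p.2 ∧ p.2 < C) :
    pvBuildB cellsB = some (pvBuildA cellsA
      (cellsA.foldl (fun a p => min a p.1) R) (cellsA.foldl (fun a p => max a p.1) (-1))
      (cellsA.foldl (fun a p => min a p.2) C) (cellsA.foldl (fun a p => max a p.2) (-1))) := by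
  have hsB : s ∈ cellsB := (hmem s).1 hsA
  have hBne : cellsB ≠ [] := fun h => by subst h; cases hsB
  obtain ⟨hs1, hs2, hs3, hs4⟩ := hbnd s hsA
  -- the four min/max are defined
  obtain ⟨minr, hminr⟩ : ∃ m, PySem.List.min? (cellsB.map Prod.fst) (fun v => v) = some m := by
    cases h : PySem.List.min? (cellsB.map Prod.fst) (fun v => v) with
    | none => exact absurd (by simpa using (PySem.List.min?_eq_none_iff _ _).1 h) hBne
    | some m => exact ⟨m, rfl⟩
  obtain ⟨maxr, hmaxr⟩ : ∃ m, PySem.List.max? (cellsB.map Prod.fst) (fun v => v) = some m := by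
    cases h : PySem.List.max? (cellsB.map Prod.fst) (fun v => v) with
    | none => exact absurd (by simpa using (PySem.List.max?_eq_none_iff _ _).1 h) hBne
    | some m => exact ⟨m, rfl⟩
  obtain ⟨minc, hminc⟩ : ∃ m, PySem.List.min? (cellsB.map Prod.snd) (fun v => v) = some m := by
    cases h : PySem.List.min? (cellsB.map Prod.snd) (fun v => v) with
    | none => exact absurd (by simpa using (PySem.List.min?_eq_none_iff _ _).1 h) hBne
    | some m => exact ⟨m, rfl⟩
  obtain ⟨maxc, hmaxc⟩ : ∃ m, PySem.List.max? (cellsB.map Prod.snd) (fun v => v) = some m := by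
    cases h : PySem.List.max? (cellsB.map Prod.snd) (fun v => v) with
    | none => exact absurd (by simpa using (PySem.List.max?_eq_none_iff _ _).1 h) hBne
    | some m => exact ⟨m, rfl⟩
  rw [pvFoldMinEq Prod.fst cellsA cellsB hmem s hsA R hs2 minr hminr,
    pvFoldMaxEq Prod.fst cellsA cellsB hmem s hsA (by omega) maxr hmaxr,
    pvFoldMinEq Prod.snd cellsA cellsB hmem s hsA C hs4 minc hminc,
    pvFoldMaxEq Prod.snd cellsA cellsB hmem s hsA (by omega) maxc hmaxc]
  have hBB : pvBuildB cellsB = some ((PySem.List.pyRange 0 (maxr - minr + 3) 1).map fun i =>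
      (PySem.List.pyRange 0 (maxc - minc + 3) 1).map fun j =>
        PySem.Set.contains (PySem.Set.ofList cellsB) (minr - 1 + i, minc - 1 + j)) := by
    rw [pvBuildB, hminr, hmaxr, hminc, hmaxc]
  rw [hBB]
  congr 1
  -- per-cell bounds relative to the bounding box
  have hbox : ∀ p ∈ cellsA, minr ≤ p.1 ∧ p.1 ≤ maxr ∧ minc ≤ p.2 ∧ p.2 ≤ maxc := by
    intro p hp
    have hpB := (hmem p).1 hp
    exact ⟨PySem.List.min?_isMin hminr p.1 (List.mem_map.2 ⟨p, hpB, rfl⟩),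
      PySem.List.max?_isMax hmaxr p.1 (List.mem_map.2 ⟨p, hpB, rfl⟩),
      PySem.List.min?_isMin hminc p.2 (List.mem_map.2 ⟨p, hpB, rfl⟩),
      PySem.List.max?_isMax hmaxc p.2 (List.mem_map.2 ⟨p, hpB, rfl⟩)⟩
  have hminrB := PySem.List.min?_mem hminr
  have hmaxrB := PySem.List.max?_mem hmaxr
  have hmincB := PySem.List.min?_mem hminc
  have hmaxcB := PySem.List.max?_mem hmaxc
  obtain ⟨qr, hqr, hqre⟩ := List.mem_map.1 hminrB
  obtain ⟨qR, hqR, hqRe⟩ := List.mem_map.1 hmaxrB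
  obtain ⟨qc, hqc, hqce⟩ := List.mem_map.1 hmincB
  obtain ⟨qC, hqC, hqCe⟩ := List.mem_map.1 hmaxcB
  obtain ⟨hbr, hbR, _, _⟩ := hbox s hsA
  have hminr0 : 0 ≤ minr := by have := (hbnd qr ((hmem qr).2 hqr)).1; omega
  have hminc0 : 0 ≤ minc := by have := (hbnd qc ((hmem qc).2 hqc)).2.2.1; omega
  have hrr : minr ≤ maxr := by omega
  have hcc : minc ≤ maxc := by have := hbox s hsA; omega
  set H : Nat := (maxr - minr + 1 + 2).toNat with hH
  set W : Nat := (maxc - minc + 1 + 2).toNat with hW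
  have hbase : pvShapeN (List.replicate H (List.replicate W false)) H W := by
    refine ⟨by simp, ?_⟩
    intro row hrow
    rw [List.eq_of_mem_replicate hrow]
    simp
  have hbnd2 : ∀ p ∈ cellsA, 0 ≤ p.1 - minr + 1 ∧ (p.1 - minr + 1).toNat < H ∧
      0 ≤ p.2 - minc + 1 ∧ (p.2 - minc + 1).toNat < W := by
    intro p hp
    obtain ⟨h1, h2, h3, h4⟩ := hbox p hp
    refine ⟨by omega, by omega, by omega, by omega⟩
  have hshA := pvShapeN_fold minr minc H W cellsA
    (List.replicate H (List.replicate W false)) hbase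
    (fun p hp => ⟨(hbnd2 p hp).1, (hbnd2 p hp).2.2.1⟩)
  have hAeq : pvBuildA cellsA minr maxr minc maxc =
      cellsA.foldl (fun a p => pvSet2 a (p.1 - minr + 1) (p.2 - minc + 1) true)
        (List.replicate H (List.replicate W false)) := by
    rw [pvBuildA]
  rw [hAeq]
  apply List.ext_getElem
  · rw [List.length_map, PySem.List.length_pyRange_one, hshA.1]
    omega
  · intro k hk1 hk2
    have hkH : k < H := by rw [hshA.1] at hk2; exact hk2
    have harow : ((PySem.List.pyRange 0 (maxr - minr + 3) 1).map fun i =>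
        (PySem.List.pyRange 0 (maxc - minc + 3) 1).map fun j =>
          PySem.Set.contains (PySem.Set.ofList cellsB) (minr - 1 + i, minc - 1 + j))[k] =
        (PySem.List.pyRange 0 (maxc - minc + 3) 1).map fun j =>
          PySem.Set.contains (PySem.Set.ofList cellsB) (minr - 1 + (0 + (k : Int)), minc - 1 + j) := by
      rw [List.getElem_map, PySem.List.getElem_pyRange_one]
    rw [harow]
    set FA := cellsA.foldl (fun a p => pvSet2 a (p.1 - minr + 1) (p.2 - minc + 1) true)
      (List.replicate H (List.replicate W false)) with hFA
    have hkFA : k < FA.length := by rw [hFA] at *; rw [hshA.1]; exact hkH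
    have hrowlen : (FA[k]'hkFA).length = W := hshA.2 _ (List.getElem_mem hkFA)
    apply List.ext_getElem
    · rw [List.length_map, PySem.List.length_pyRange_one, hrowlen]
      omega
    · intro j hj1 hj2
      rw [List.getElem_map, PySem.List.getElem_pyRange_one]
      have hjW : j < W := by rw [hrowlen] at hj2; exact hj2
      have hget : pvGet2 FA (k : Int) (j : Int) = (FA[k]'hkFA)[j]'(by rw [hrowlen]; exact hjW) := by
        rw [pvGet2_nonneg FA (k:Int) (j:Int) (by omega) (by omega)]
        simp only [Int.toNat_natCast]
        rw [List.getElem?_eq_getElem hkFA]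
        simp only [Option.bind_some]
        rw [List.getElem?_eq_getElem (by rw [hrowlen]; exact hjW)]
        rfl
      have hiff := pvBuildA_fold_get minr minc H W cellsA
        (List.replicate H (List.replicate W false)) hbase hbnd2 (k : Int) (j : Int)
        (by omega) (by omega)
      rw [pvGet2_replicate H W (k:Int) (j:Int) (by omega) (by omega)] at hiff
      simp only [Bool.false_eq_true, false_or] at hiff
      rw [← hFA] at hiff
      have hmemiff : PySem.Set.contains (PySem.Set.ofList cellsB)
          (minr - 1 + (0 + (k : Int)), minc - 1 + (0 + (j : Int))) = true ↔
          ∃ p ∈ cellsA, p.1 - minr + 1 = (k : Int) ∧ p.2 - minc + 1 = (j : Int) := by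
        rw [PySem.Set.contains_iff]
        rw [PySem.Set.mem_ofList]
        constructor
        · intro hm
          refine ⟨_, (hmem _).2 hm, by simp; omega, by simp; omega⟩
        · rintro ⟨p, hp, he1, he2⟩
          have : p = (minr - 1 + (0 + (k : Int)), minc - 1 + (0 + (j : Int))) := by
            obtain ⟨p1, p2⟩ := p
            simp only [Prod.mk.injEq]
            constructor <;> simp at he1 he2 <;> omega
          rw [← this]
          exact (hmem p).1 hp
      rw [← hget]
      have hlink := hiff.trans hmemiff.symm
      cases hA : pvGet2 FA (k : Int) (j : Int) <;>
        cases hB : PySem.Set.contains (PySem.Set.ofList cellsB)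
          (minr - 1 + (0 + (k : Int)), minc - 1 + (0 + (j : Int))) <;>
        rw [hA, hB] at hlink <;> simp_all


/-! The outer row-major scan: both programs keep equal visited sets and equal region lists. -/

structure PvOuter (matrix : List (List Bool))
    (stA : List (List Bool) × List (List (List Bool)))
    (stB : PySem.Set (Int × Int) × List (List (List Bool))) : Prop where
  shape : pvShape matrix stA.1
  vm_iff : ∀ p, pvVM stA.1 p ↔ p ∈ stB.1
  sub_tc : ∀ p, p ∈ stB.1 → pvTC matrix p
  closed : ∀ p q, p ∈ stB.1 → pvEdge matrix p q → q ∈ stB.1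
  regs : stA.2 = stB.2

theorem pvFoldRel {σ τ ι : Type} (R : σ → τ → Prop) (f : σ → ι → σ) (g : τ → ι → τ) :
    ∀ (l : List ι) (s : σ) (t : τ), R s t →
      (∀ x ∈ l, ∀ s t, R s t → R (f s x) (g t x)) →
      R (l.foldl f s) (l.foldl g t) := by
  intro l
  induction l with
  | nil => intro s t h _; exact h
  | cons a l ih =>
    intro s t h hstep
    exact ih (f s a) (g t a) (hstep a (List.mem_cons_self ..) s t h)
      (fun x hx => hstep x (List.mem_cons_of_mem _ hx))

theorem pvInnerStep (matrix : List (List Bool)) (r c : Int)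
    (hr0 : 0 ≤ r) (hr1 : r < (matrix.length : Int))
    (hc0 : 0 ≤ c) (hc1 : c < (matrix.headI.length : Int))
    (stA : List (List Bool) × List (List (List Bool)))
    (stB : PySem.Set (Int × Int) × List (List (List Bool)))
    (hR : PvOuter matrix stA stB) :
    PvOuter matrix
      (if pvGet2 matrix r c && !(pvGet2 stA.1 r c) then
        (let res := pvDfsA matrix (matrix.length : Int) (matrix.headI.length : Int)
            [(r, c)] stA.1 [] (matrix.length : Int) (-1) (matrix.headI.length : Int) (-1)
         (res.2.2.2.2.2,
          stA.2 ++ [pvBuildA res.1 res.2.1 res.2.2.1 res.2.2.2.1 res.2.2.2.2.1]))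
       else stA)
      (if pvGet2 matrix r c && !(PySem.Set.contains stB.1 (r, c)) then
        (let res := pvBfsB matrix (matrix.length : Int) (matrix.headI.length : Int)
            [(r, c)] [(r, c)] (PySem.Set.add stB.1 (r, c))
         (res.2, match pvBuildB res.1 with
                 | some arr => stB.2 ++ [arr]
                 | none => stB.2))
       else stB) := by
  have hgeq : pvGet2 stA.1 r c = PySem.Set.contains stB.1 (r, c) := by
    have hiff : pvGet2 stA.1 r c = true ↔ PySem.Set.contains stB.1 (r, c) = true := by
      rw [PySem.Set.contains_iff]
      constructor
      · intro h; exact (hR.vm_iff (r, c)).1 ⟨hr0, hc0, h⟩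
      · intro h; exact ((hR.vm_iff (r, c)).2 h).2.2
    cases hA : pvGet2 stA.1 r c <;> cases hB : PySem.Set.contains stB.1 (r, c) <;>
      rw [hA, hB] at hiff <;> simp_all
  rw [hgeq]
  by_cases hcnd : (pvGet2 matrix r c && !(PySem.Set.contains stB.1 (r, c))) = true
  · rw [if_pos hcnd, if_pos hcnd]
    simp only [Bool.and_eq_true, Bool.not_eq_true'] at hcnd
    obtain ⟨hmt, hnin⟩ := hcnd
    have htc : pvTC matrix (r, c) := ⟨hr0, hr1, hc0, hc1, hmt⟩
    have hnmem : (r, c) ∉ stB.1 := fun hm => by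
      rw [(PySem.Set.contains_iff _ _).2 hm] at hnin; cases hnin
    have hnvm : ¬ pvVM stA.1 (r, c) := fun hv => hnmem ((hR.vm_iff (r, c)).1 hv)
    have hV0cl : ∀ p q, p ∈ stB.1 → pvEdge matrix p q → q ∈ stB.1 := hR.closed
    -- run the DFS spec
    have hA := pvDfsA_spec matrix (r, c) (· ∈ stB.1) hV0cl htc hnmem
      [(r, c)] stA.1 [] (matrix.length : Int) (-1) (matrix.headI.length : Int) (-1)
      (by
        refine ⟨hR.shape, ?_, ?_, ?_, ?_, ?_, Or.inr (List.mem_cons_self ..),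
          rfl, rfl, rfl, rfl⟩
        · intro p hp
          rcases List.mem_cons.1 hp with rfl | hp2
          · exact ⟨htc, Relation.ReflTransGen.refl⟩
          · cases hp2
        · intro p hp
          exact (hR.vm_iff p).2 hp
        · intro p hp
          exact Or.inl ((hR.vm_iff p).1 hp)
        · intro p q hp he
          exact Or.inl ((hR.vm_iff q).2 (hR.closed p q ((hR.vm_iff p).1 hp) he))
        · intro p
          simp only [List.not_mem_nil, false_iff]
          rintro ⟨hvm, hn⟩
          exact hn ((hR.vm_iff p).1 hvm))
    -- run the BFS spec
    have hB := pvBfsB_spec matrix (r, c) (· ∈ stB.1) hV0cl hnmem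
      [(r, c)] [(r, c)] (PySem.Set.add stB.1 (r, c))
      (by
        refine ⟨?_, fun p hp => hp, ?_, ?_, List.mem_cons_self ..⟩
        · intro p hp
          rcases List.mem_cons.1 hp with rfl | hp2
          · exact ⟨htc, Relation.ReflTransGen.refl, hnmem⟩
          · cases hp2
        · intro p
          rw [PySem.Set.mem_add]
          constructor
          · rintro (h | rfl)
            · exact Or.inl h
            · exact Or.inr (List.mem_cons_self ..)
          · rintro (h | h)
            · exact Or.inl h
            · rcases List.mem_cons.1 h with rfl | h2
              · exact Or.inr rfl
              · cases h2
        · intro p hp hnp q he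
          exfalso
          rcases List.mem_cons.1 hp with rfl | h2
          · exact hnp (List.mem_cons_self ..)
          · cases h2)
    obtain ⟨hBcells, hBvis⟩ := hB
    -- the two components have the same member set
    have hmem : ∀ p, p ∈ (pvDfsA matrix (matrix.length : Int) (matrix.headI.length : Int)
        [(r, c)] stA.1 [] (matrix.length : Int) (-1) (matrix.headI.length : Int) (-1)).1 ↔
        p ∈ (pvBfsB matrix (matrix.length : Int) (matrix.headI.length : Int)
        [(r, c)] [(r, c)] (PySem.Set.add stB.1 (r, c))).1 := by
      intro p
      rw [hA.cells_iff p, hBcells p]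
    have hsA : (r, c) ∈ (pvDfsA matrix (matrix.length : Int) (matrix.headI.length : Int)
        [(r, c)] stA.1 [] (matrix.length : Int) (-1) (matrix.headI.length : Int) (-1)).1 := by
      rw [hA.cells_iff]
      exact Relation.ReflTransGen.refl
    have hbnd : ∀ p ∈ (pvDfsA matrix (matrix.length : Int) (matrix.headI.length : Int)
        [(r, c)] stA.1 [] (matrix.length : Int) (-1) (matrix.headI.length : Int) (-1)).1,
        0 ≤ p.1 ∧ p.1 < (matrix.length : Int) ∧ 0 ≤ p.2 ∧ p.2 < (matrix.headI.length : Int) := by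
      intro p hp
      have := pvReach_tc matrix (r, c) p htc ((hA.cells_iff p).1 hp)
      exact ⟨this.1, this.2.1, this.2.2.1, this.2.2.2.1⟩
    have hreg := pvRegionEq _ _ hmem (r, c) hsA (matrix.length : Int)
      (matrix.headI.length : Int) hbnd
    refine ⟨hA.shape, ?_, ?_, ?_, ?_⟩
    · intro p
      rw [hA.vis_iff p, hBvis p]
    · intro p hp
      rcases (hBvis p).1 hp with h | h
      · exact hR.sub_tc p h
      · exact pvReach_tc matrix (r, c) p htc h
    · intro p q hp he
      rcases (hBvis p).1 hp with h | h
      · exact (hBvis q).2 (Or.inl (hR.closed p q h he))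
      · exact (hBvis q).2 (Or.inr (h.tail he))
    · simp only []
      rw [hreg, hR.regs, hA.acc_minr, hA.acc_maxr, hA.acc_minc, hA.acc_maxc]
  · rw [if_neg hcnd, if_neg hcnd]
    exact hR

theorem pvGetD_zero_headI (matrix : List (List Bool)) :
    PySem.List.pyGetD matrix 0 [] = matrix.headI := by
  cases matrix with
  | nil => rfl
  | cons h t => rw [PySem.List.pyGetD_zero_cons]; rfl

theorem pvMainEq (matrix : List (List Bool)) :
    find_regions_as_local_arrays matrix = find_regions_as_local_arrays_alt matrix := by
  rw [find_regions_as_local_arrays, find_regions_as_local_arrays_alt]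
  simp only [PySem.List.len_eq, pvGetD_zero_headI]
  refine PvOuter.regs (matrix := matrix) ?_
  apply pvFoldRel (PvOuter matrix)
  · -- initial states are related
    refine ⟨⟨by simp, ?_⟩, ?_, ?_, ?_, rfl⟩
    · intro row hrow
      rw [List.eq_of_mem_replicate hrow]
      simp
    · intro p
      constructor
      · rintro ⟨h1, h2, h3⟩
        rw [pvGet2_replicate _ _ p.1 p.2 h1 h2] at h3
        cases h3
      · intro h
        cases h
    · intro p h
      cases h
    · intro p q h
      cases h
  · -- each row step preserves the relation
    intro r hr sA sB hRel
    have hrb := PySem.List.mem_pyRange_one.1 hr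
    apply pvFoldRel (PvOuter matrix)
    · exact hRel
    · intro c hc sA' sB' hRel'
      have hcb := PySem.List.mem_pyRange_one.1 hc
      exact pvInnerStep matrix r c hrb.1 hrb.2 hcb.1 hcb.2 sA' sB' hRel'

-- ===== VERDICT (by name: the statement is the Claim_ definition above) =====
theorem find_regions_as_local_arrays_spec : Claim_equal_find_regions_as_local_arrays := by
  intro matrix _ _
  unfold Spec_find_regions_as_local_arrays
  exact pvMainEq matrix
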